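-- pv_equiv track=rewrite | github.com/tachyon-beep/argentum | argentum/orchestration/auction_chat.py | _sanitize_interjection
-- ===== SOURCE A (Python) =====
-- def _sanitize_interjection(text: str) -> str:
--     # Strip quotes, code fences, and SSML-like tags to keep audio safe
--     s = text.strip()
--     # Remove backticks and quotes
--     s = s.replace("`", "").replace("\"", "").replace("'", "")
--     # Remove any angle-bracketed tags
--     out = []
--     skip = 0
--     for ch in s:
--         if ch == "<":
--             skip += 1
--             continue
--         if ch == ">" and skip > 0:
--             skip -= 1
--             continue
--         if skip == 0:
--             out.append(ch)
--     s2 = "".join(out)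
--     return s2[:140]
-- ===== SOURCE B (Python) =====
-- def _sanitize_interjection(text: str) -> str:
--     # Segment-based scan: jump between '<' occurrences with find, skip each
--     # matched tag region as a block, then delete quote characters with translate.
--     s = text.strip()
--     n = len(s)
--     parts = []
--     pos = 0
--     while pos < n:
--         i = s.find("<", pos)
--         if i == -1:
--             parts.append(s[pos:])
--             break
--         parts.append(s[pos:i])
--         depth = 1
--         j = i + 1
--         while depth and j < n:
--             c = s[j]
--             if c == "<":
--                 depth += 1
--             elif c == ">":
--                 depth -= 1
--             j += 1
--         pos = n if depth else j
--     cleaned = "".join(parts).translate(str.maketrans("", "", "`\"'"))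
--     return cleaned[:140]
-- ===== Notes on version B (the rewrite author's own statement) =====
-- stated objective: faster
-- what changed: Replaced A's character-by-character depth-counter accumulator (with quotes removed up front by three replace passes) by a segment-based scan that jumps between '<' occurrences with find, skips each matched tag region as a block via an inner matching loop, joins the depth-0 slices, and deletes quote characters afterwards with a single translate.
import Mathlib
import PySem

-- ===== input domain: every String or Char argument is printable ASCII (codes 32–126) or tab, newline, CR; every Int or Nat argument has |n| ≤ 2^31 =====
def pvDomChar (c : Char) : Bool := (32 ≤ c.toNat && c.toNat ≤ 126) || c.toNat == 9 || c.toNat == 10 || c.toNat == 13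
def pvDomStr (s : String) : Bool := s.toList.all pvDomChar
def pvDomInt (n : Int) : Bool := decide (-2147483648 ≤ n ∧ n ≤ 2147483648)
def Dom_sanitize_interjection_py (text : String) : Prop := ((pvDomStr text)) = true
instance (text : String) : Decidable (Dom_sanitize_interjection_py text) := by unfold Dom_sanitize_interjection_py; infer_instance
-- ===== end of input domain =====

-- B replaces A's per-character depth-counter accumulator by a segment scan that slices out
-- depth-0 chunks and skips matched tag regions as blocks, deleting quotes afterwards
-- (objective: faster by constant factor; a timing run measured B faster).


-- ===== PORT A =====
def sanitize_interjection_py (text : String) : String :=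
  let s := PySem.Str.strip text
  let s := PySem.Str.replace (PySem.Str.replace (PySem.Str.replace s "`" "") "\"" "") "'" ""
  let st := s.toList.foldl (fun (st : List Char × Nat) ch =>
      if ch = '<' then (st.1, st.2 + 1)
      else if ch = '>' ∧ st.2 > 0 then (st.1, st.2 - 1)
      else if st.2 = 0 then (st.1 ++ [ch], st.2)
      else st) ([], 0)
  PySem.Str.slice (String.ofList st.1) none (some 140)

-- ===== PORT B =====
-- B's inner matching loop: after an unconsumed '<' (depth d ≥ 1), consume characters
-- updating the depth and return the remainder once depth hits 0 ([] if it never does,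
-- which is B's `pos = n` case for an unmatched '<').
def pvSkip : List Char → Nat → List Char
  | [], _ => []
  | c :: t, d =>
    let d' := if c = '<' then d + 1 else if c = '>' then d - 1 else d
    if d' = 0 then t else pvSkip t d'

theorem pvSkip_length_le : ∀ (t : List Char) (d : Nat), (pvSkip t d).length ≤ t.length := by
  intro t
  induction t with
  | nil => intro d; simp [pvSkip]
  | cons c t ih =>
    intro d
    simp only [pvSkip]
    by_cases h : (if c = '<' then d + 1 else if c = '>' then d - 1 else d) = 0
    · simp [h]
    · rw [if_neg h]
      exact le_trans (ih _) (by simp)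

-- B's outer loop: keep depth-0 characters until the next '<', then skip its region.
def pvSegs : List Char → List Char
  | [] => []
  | c :: t => if c = '<' then pvSegs (pvSkip t 1) else c :: pvSegs t
termination_by t => t.length
decreasing_by
  · exact Nat.lt_succ_of_le (pvSkip_length_le t 1)
  · simp

-- characters deleted by translate
def pvKeep (c : Char) : Bool := !(c = '`' || c = '"' || c = '\'')

def sanitize_interjection_py_alt (text : String) : String :=
  String.ofList (((pvSegs (PySem.Str.strip text).toList).filter pvKeep).take 140)

-- ===== PRECONDITION & SPEC =====
def Spec_sanitize_interjection_py (text : String) (out : String) : Prop := out = sanitize_interjection_py_alt text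
instance (text : String) (out : String) : Decidable (Spec_sanitize_interjection_py text out) := by unfold Spec_sanitize_interjection_py; infer_instance

-- ===== CLAIM (what is proved, stated in full; the proofs are below) =====
def Claim_equal_sanitize_interjection_py : Prop := ∀ (text : String), Dom_sanitize_interjection_py text → Spec_sanitize_interjection_py text (sanitize_interjection_py text)

-- ===== LEMMAS AND PROOFS =====

-- replacing a single character by the empty string is filtering it out
theorem pv_replace_go_eq (c : Char) (l : List Char) :
    ∀ (fuel : Nat) (acc : List Char), l.length ≤ fuel →
      PySem.Chars.replace.go [c] [] fuel l acc = acc.reverse ++ l.filter (fun x => x ≠ c) := by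
  induction l with
  | nil =>
    intro fuel acc _
    cases fuel <;> simp [PySem.Chars.replace.go]
  | cons c' t ih =>
    intro fuel acc hle
    cases fuel with
    | zero => simp at hle
    | succ fuel =>
      by_cases h : c = c'
      · subst h
        simp only [PySem.Chars.replace.go, List.isPrefixOf]
        rw [if_pos (by simp)]
        have hd : List.drop [c].length (c :: t) = t := by simp
        rw [hd]
        rw [show ([] : List Char).reverse ++ acc = acc by simp]
        rw [ih fuel acc (by simpa using hle)]
        simp
      · simp only [PySem.Chars.replace.go, List.isPrefixOf]
        rw [if_neg (by simp [h])]
        rw [ih fuel (c' :: acc) (by simpa using hle)]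
        simp [Ne.symm h]

theorem pv_replace_single (cs : List Char) (c : Char) :
    PySem.Chars.replace cs [c] [] = cs.filter (fun x => x ≠ c) := by
  simp only [PySem.Chars.replace, List.isEmpty_cons, if_false, Bool.false_eq_true]
  simpa using pv_replace_go_eq c cs cs.length [] (le_refl _)

-- A's tag machine, extracted from the fold
def pvM : List Char → Nat → List Char
  | [], _ => []
  | c :: t, d =>
    if c = '<' then pvM t (d + 1)
    else if c = '>' ∧ d > 0 then pvM t (d - 1)
    else if d = 0 then c :: pvM t d
    else pvM t d

theorem pv_foldl_eq_pvM (cs : List Char) :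
    ∀ (out : List Char) (d : Nat),
      (cs.foldl (fun (st : List Char × Nat) ch =>
        if ch = '<' then (st.1, st.2 + 1)
        else if ch = '>' ∧ st.2 > 0 then (st.1, st.2 - 1)
        else if st.2 = 0 then (st.1 ++ [ch], st.2)
        else st) (out, d)).1 = out ++ pvM cs d := by
  induction cs with
  | nil => intro out d; simp [pvM]
  | cons c t ih =>
    intro out d
    simp only [List.foldl_cons, pvM]
    by_cases h1 : c = '<'
    · simp [h1, ih]
    · by_cases h2 : c = '>' ∧ d > 0
      · simp [h1, h2, ih]
      · by_cases h3 : d = 0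
        · simp [h1, h2, h3, ih]
        · simp [h1, h2, h3, ih]

-- quote filtering commutes with A's tag machine (quote chars are not brackets)
theorem pv_filter_pvM (cs : List Char) :
    ∀ d, pvM (cs.filter pvKeep) d = (pvM cs d).filter pvKeep := by
  induction cs with
  | nil => intro d; simp [pvM]
  | cons c t ih =>
    intro d
    by_cases hq : pvKeep c
    · rw [List.filter_cons_of_pos hq]
      simp only [pvM]
      by_cases h1 : c = '<'
      · simp [h1, ih]
      · by_cases h2 : c = '>' ∧ d > 0
        · simp [h1, h2, ih]
        · by_cases h3 : d = 0
          · simp [h1, h2, h3, ih, hq]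
          · simp [h1, h2, h3, ih]
    · rw [List.filter_cons_of_neg (by simpa using hq)]
      have h1 : c ≠ '<' := by intro h; subst h; exact hq (by decide)
      have h2 : c ≠ '>' := by intro h; subst h; exact hq (by decide)
      simp only [pvM, h1, h2, if_neg, ite_false]
      by_cases h3 : d = 0
      · simp [h1, h2, h3, ih, hq]
      · simp [h1, h2, h3, ih]

-- A's machine equals B's segment scan: at depth 0 both keep characters,
-- and inside a region A's counting matches B's pvSkip.
theorem pv_pvM_pvSegs : ∀ (n : Nat) (t : List Char), t.length ≤ n →
    (pvM t 0 = pvSegs t) ∧ (∀ d, 1 ≤ d → pvM t d = pvSegs (pvSkip t d)) := by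
  intro n
  induction n with
  | zero =>
    intro t ht
    have : t = [] := List.eq_nil_of_length_eq_zero (Nat.le_zero.mp ht)
    subst this
    exact ⟨by simp [pvM, pvSegs], fun d _ => by simp [pvM, pvSkip, pvSegs]⟩
  | succ n ih =>
    intro t ht
    cases t with
    | nil => exact ⟨by simp [pvM, pvSegs], fun d _ => by simp [pvM, pvSkip, pvSegs]⟩
    | cons c t =>
      have ht' : t.length ≤ n := by simpa using ht
      constructor
      · by_cases h1 : c = '<'
        · have := (ih t ht').2 1 (le_refl 1)
          simp [pvM, pvSegs, h1, this]
        · have h2 : ¬ (c = '>' ∧ (0:Nat) > 0) := by simp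
          have := (ih t ht').1
          simp [pvM, pvSegs, h1, h2, this]
      · intro d hd
        by_cases h1 : c = '<'
        · have := (ih t ht').2 (d + 1) (by omega)
          simp [pvM, pvSkip, h1, this]
        · by_cases h2 : c = '>'
          · by_cases hd1 : d = 1
            · have := (ih t ht').1
              simp [pvM, pvSkip, h1, h2, hd1, this]
            · have hge : 1 ≤ d - 1 := by omega
              have := (ih t ht').2 (d - 1) hge
              have hd0 : ¬ (d - 1 = 0) := by omega
              simp [pvM, pvSkip, h1, h2, (by omega : d > 0), hd0, this]
          · have := (ih t ht').2 d hd
            have hd0 : ¬ (d = 0) := by omega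
            simp [pvM, pvSkip, h1, h2, hd0, this]

-- ===== VERDICT (by name: the statement is the Claim_ definition above) =====
set_option maxHeartbeats 1000000 in
theorem sanitize_interjection_py_spec : Claim_equal_sanitize_interjection_py := by
  intro text _
  unfold Spec_sanitize_interjection_py sanitize_interjection_py sanitize_interjection_py_alt
  simp only [PySem.Str.replace, String.toList_ofList]
  have hbt : ("`" : String).toList = ['`'] := by decide
  have hdq : ("\"" : String).toList = ['"'] := by decide
  have hsq : ("'" : String).toList = ['\''] := by decide
  have hemp : ("" : String).toList = [] := by decide
  rw [hbt, hdq, hsq, hemp, pv_replace_single, pv_replace_single, pv_replace_single]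
  set cs := (PySem.Str.strip text).toList with hcs
  have hfilters : ((cs.filter (fun x => x ≠ '`')).filter (fun x => x ≠ '"')).filter
      (fun x => x ≠ '\'') = cs.filter pvKeep := by
    simp only [List.filter_filter]
    apply List.filter_congr
    intro x _
    simp only [pvKeep, Bool.not_or]
    cases h1 : decide (x = '`') <;> cases h2 : decide (x = '\"') <;> cases h3 : decide (x = '\'') <;>
      simp [h1, h2, h3]
  rw [hfilters, pv_foldl_eq_pvM, List.nil_append, pv_filter_pvM,
    (pv_pvM_pvSegs cs.length cs (le_refl _)).1]
  simp only [PySem.Str.slice, PySem.Chars.slice, String.toList_ofList]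
  rw [show ((140 : Int)) = ((140 : Nat) : Int) by norm_num, PySem.List.slice_to_natCast]
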